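-- pv_equiv track=rewrite | github.com/mark1ry/AoC-25 | day_06/cephalopod_math.py | do_calculations
-- ===== SOURCE A (Python) =====
-- def do_calculations(numbers: list, operation: str) -> int:
--
--     if operation=="+":
--         return sum(numbers)
--
--     if operation=="*":
--         temp = 1
--         for element in numbers:
--             temp *= element
--         return temp
-- ===== SOURCE B (Python) =====
-- def do_calculations(numbers: list, operation: str) -> int:
--     # Balanced divide-and-conquer tree reduction instead of a left-to-right pass.
--     def reduce_range(lo, hi, combine, identity):
--         if hi - lo == 0:
--             return identity
--         if hi - lo == 1:
--             return numbers[lo]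
--         mid = (lo + hi) // 2
--         return combine(reduce_range(lo, mid, combine, identity),
--                        reduce_range(mid, hi, combine, identity))
--     if operation == "+":
--         return reduce_range(0, len(numbers), lambda a, b: a + b, 0)
--     if operation == "*":
--         return reduce_range(0, len(numbers), lambda a, b: a * b, 1)
-- ===== Notes on version B (the rewrite author's own statement) =====
-- stated objective: alternative
-- what changed: Replaces A's single left-to-right passes (sum call / product accumulator loop) with a balanced divide-and-conquer tree reduction over index ranges, correct because + and * are associative with identities 0 and 1.
-- outside the precondition, e.g. on do_calculations([1, 2], '-'): A returns None, B returns None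
import Mathlib
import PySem

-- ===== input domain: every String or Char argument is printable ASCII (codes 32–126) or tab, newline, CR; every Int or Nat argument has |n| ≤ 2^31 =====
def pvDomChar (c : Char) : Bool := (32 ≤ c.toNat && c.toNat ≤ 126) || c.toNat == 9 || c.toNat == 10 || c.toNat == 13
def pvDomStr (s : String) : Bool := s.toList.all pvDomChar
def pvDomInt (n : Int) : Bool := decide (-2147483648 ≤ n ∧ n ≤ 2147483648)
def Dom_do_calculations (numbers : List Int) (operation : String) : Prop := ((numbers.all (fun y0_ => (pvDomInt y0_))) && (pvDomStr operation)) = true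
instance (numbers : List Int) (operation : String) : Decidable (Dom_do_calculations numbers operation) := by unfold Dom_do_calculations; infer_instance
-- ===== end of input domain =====

-- B replaces A's left-to-right passes with a balanced divide-and-conquer tree reduction; equivalence proved on operations "+" and "*".

-- ===== PORT A =====
-- literal port: branch on "+" (sum), branch on "*" (accumulator product loop); Python
-- returns None on any other operation — those inputs are outside Pre_, port returns 0.
def do_calculations (numbers : List Int) (operation : String) : Int :=
  if operation = "+" then
    numbers.foldl (fun a b => a + b) 0
  else if operation = "*" then
    numbers.foldl (fun temp element => temp * element) 1
  else 0

-- ===== PORT B =====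
-- B's recursive range reducer: split the list in half, reduce each half, combine.
def pvReduceRange (combine : Int → Int → Int) (identity : Int) (l : List Int) : Int :=
  if l.length ≤ 1 then
    match l with
    | [] => identity
    | x :: _ => x
  else
    combine (pvReduceRange combine identity (l.take (l.length / 2)))
            (pvReduceRange combine identity (l.drop (l.length / 2)))
termination_by l.length
decreasing_by
  · simp; omega
  · simp; omega

def do_calculations_alt (numbers : List Int) (operation : String) : Int :=
  if operation = "+" then
    pvReduceRange (fun a b => a + b) 0 numbers
  else if operation = "*" then
    pvReduceRange (fun a b => a * b) 1 numbers
  else 0   -- Python B returns None here; outside Pre_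

-- ===== PRECONDITION & SPEC =====
-- Pre_ excludes operations other than "+" and "*": there Python A (and B) returns None, no int value.
def Pre_do_calculations (numbers : List Int) (operation : String) : Prop :=
  operation = "+" ∨ operation = "*"
instance (numbers : List Int) (operation : String) : Decidable (Pre_do_calculations numbers operation) := by unfold Pre_do_calculations; infer_instance

def pvWitness_do_calculations : List Int × String := ([2, 3, 4], "*")

def Spec_do_calculations (numbers : List Int) (operation : String) (out : Int) : Prop := out = do_calculations_alt numbers operation
instance (numbers : List Int) (operation : String) (out : Int) : Decidable (Spec_do_calculations numbers operation out) := by unfold Spec_do_calculations; infer_instance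

-- ===== CLAIM (what is proved, stated in full; the proofs are below) =====
def Claim_equal_do_calculations : Prop := ∀ (numbers : List Int) (operation : String), Dom_do_calculations numbers operation → Pre_do_calculations numbers operation → Spec_do_calculations numbers operation (do_calculations numbers operation)

-- ===== LEMMAS AND PROOFS =====

-- with an associative f with two-sided identity e, a foldl from any seed factors out the seed
theorem pv_foldl_factor (f : Int → Int → Int) (e : Int)
    (hassoc : ∀ a b c, f (f a b) c = f a (f b c))
    (hidl : ∀ a, f e a = a) (hidr : ∀ a, f a e = a) :
    ∀ (l : List Int) (x : Int), l.foldl f x = f x (l.foldl f e) := by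
  intro l
  induction l with
  | nil => intro x; simp [hidr]
  | cons y t ih =>
      intro x
      simp only [List.foldl_cons]
      rw [ih (f x y), ih (f e y), hidl, hassoc]

-- the tree reduction equals the left fold for associative f with identity e
theorem pvReduceRange_eq_foldl (f : Int → Int → Int) (e : Int)
    (hassoc : ∀ a b c, f (f a b) c = f a (f b c))
    (hidl : ∀ a, f e a = a) (hidr : ∀ a, f a e = a) :
    ∀ (n : Nat) (l : List Int), l.length ≤ n → pvReduceRange f e l = l.foldl f e := by
  intro n
  induction n with
  | zero =>
      intro l hl
      have : l = [] := List.length_eq_zero_iff.mp (Nat.le_zero.mp hl)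
      subst this
      rw [pvReduceRange.eq_def]; simp
  | succ n ih =>
      intro l hl
      rw [pvReduceRange.eq_def]
      by_cases hle : l.length ≤ 1
      · rw [if_pos hle]
        match l, hle with
        | [], _ => simp
        | [x], _ => simp [hidl]
      · rw [if_neg hle]
        simp at hle
        have h1 : (l.take (l.length / 2)).length ≤ n := by simp; omega
        have h2 : (l.drop (l.length / 2)).length ≤ n := by simp; omega
        rw [ih _ h1, ih _ h2]
        conv_rhs => rw [← List.take_append_drop (l.length / 2) l, List.foldl_append,
          pv_foldl_factor f e hassoc hidl hidr]

-- ===== VERDICT (by name: the statement is the Claim_ definition above) =====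
theorem do_calculations_spec : Claim_equal_do_calculations := by
  intro numbers operation _ hpre
  unfold Spec_do_calculations do_calculations do_calculations_alt
  rcases hpre with h | h <;> subst h <;> simp <;>
    rw [pvReduceRange_eq_foldl _ _ (by intros; ring) (by intros; ring) (by intros; ring) numbers.length numbers le_rfl]
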